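-- pv_equiv track=rewrite | github.com/qmng/amazon-review-data-mining-project | src/performance.py | countMissclassified
-- ===== SOURCE A (Python) =====
-- def countMissclassified(test1, test2):
-- 	#n01: test1 correctly classified but test2 missclassified
-- 	n01 = 0
-- 	#n10: test1 missclassified but test2 correctly classified
-- 	n10 = 0
-- 	for i in range(len(test1)):
-- 		if test1[i]:
-- 			if not(test2[i]):
-- 				n01 = n01 + 1
-- 		elif not(test1[i]):
-- 			if test2[i]:
-- 				n10 = n10 + 1
-- 	return [n01, n10]
-- ===== SOURCE B (Python) =====
-- def countMissclassified(test1, test2):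
--     # Arithmetic (set-cardinality) formulation: with T1 = positions predicted
--     # True by test1, T2 = by test2 (truncated to test1's length), and B = T1 & T2,
--     #   n01 = |T1| - |B|   and   n10 = |T2| - |B|.
--     t2 = test2[:len(test1)]
--     both = sum(1 for a, b in zip(test1, t2) if a and b)
--     ones1 = sum(1 for a in test1 if a)
--     ones2 = sum(1 for b in t2 if b)
--     return [ones1 - both, ones2 - both]
-- ===== Notes on version B (the rewrite author's own statement) =====
-- stated objective: alternative
-- what changed: B replaces A's per-element nested if/elif updates of two discordant counters by an arithmetic identity over three totals: count of True in test1, count of True in the truncated test2, and count of positions where both are True; the discordant counts are the differences ones1-both and ones2-both.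
import Mathlib
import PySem

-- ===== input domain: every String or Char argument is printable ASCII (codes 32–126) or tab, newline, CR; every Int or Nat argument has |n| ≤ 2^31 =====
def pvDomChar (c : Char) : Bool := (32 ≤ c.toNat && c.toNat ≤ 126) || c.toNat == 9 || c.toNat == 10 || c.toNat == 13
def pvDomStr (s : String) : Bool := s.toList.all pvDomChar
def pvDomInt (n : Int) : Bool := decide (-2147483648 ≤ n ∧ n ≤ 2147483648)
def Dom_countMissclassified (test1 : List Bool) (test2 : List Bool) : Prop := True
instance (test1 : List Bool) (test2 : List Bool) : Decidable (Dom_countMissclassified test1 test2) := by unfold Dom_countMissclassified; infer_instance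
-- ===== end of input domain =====

-- B computes the two discordant counts arithmetically from three totals
-- (#True in test1, #True in truncated test2, #both-True) instead of A's
-- per-element nested if/elif counter updates.


-- ===== PORT A =====
-- literal transliteration of A: two counters, for i in range(len(test1)) with nested if/elif
def countMissclassified (test1 : List Bool) (test2 : List Bool) : List Int :=
  let st := (PySem.List.pyRange 0 (test1.length : Int) 1).foldl
    (fun (acc : Int × Int) i =>
      if PySem.List.pyGetD test1 i false then
        if !(PySem.List.pyGetD test2 i false) then (acc.1 + 1, acc.2) else acc
      else if !(PySem.List.pyGetD test1 i false) then
        if PySem.List.pyGetD test2 i false then (acc.1, acc.2 + 1) else acc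
      else acc)
    (0, 0)
  [st.1, st.2]

-- ===== PORT B =====
-- B's 'sum(1 for x in l if x)' generator sums, as folds
def pvCountTrue (l : List Bool) : Int :=
  l.foldl (fun acc a => if a then acc + 1 else acc) 0
def pvCountBoth (l : List (Bool × Bool)) : Int :=
  l.foldl (fun acc p => if p.1 && p.2 then acc + 1 else acc) 0

-- literal transliteration of B: truncate test2, three totals, two subtractions
def countMissclassified_alt (test1 : List Bool) (test2 : List Bool) : List Int :=
  let t2 := PySem.List.slice test2 none (some (test1.length : Int))
  let both := pvCountBoth (test1.zip t2)
  let ones1 := pvCountTrue test1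
  let ones2 := pvCountTrue t2
  [ones1 - both, ones2 - both]

-- ===== PRECONDITION & SPEC =====
-- Pre_ excludes exactly the inputs where Python A raises IndexError (test2 shorter than test1)
def Pre_countMissclassified (test1 : List Bool) (test2 : List Bool) : Prop :=
  test1.length ≤ test2.length
instance (test1 : List Bool) (test2 : List Bool) : Decidable (Pre_countMissclassified test1 test2) := by unfold Pre_countMissclassified; infer_instance
def pvWitness_countMissclassified : List Bool × List Bool := ([true, false, true], [false, false, true])

def Spec_countMissclassified (test1 : List Bool) (test2 : List Bool) (out : List Int) : Prop := out = countMissclassified_alt test1 test2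
instance (test1 : List Bool) (test2 : List Bool) (out : List Int) : Decidable (Spec_countMissclassified test1 test2 out) := by unfold Spec_countMissclassified; infer_instance

-- ===== CLAIM =====
def Claim_equal_countMissclassified : Prop := ∀ (test1 : List Bool) (test2 : List Bool), Dom_countMissclassified test1 test2 → Pre_countMissclassified test1 test2 → Spec_countMissclassified test1 test2 (countMissclassified test1 test2)

-- ===== LEMMAS AND PROOFS =====

-- A's counter loop counts the two discordant outcome pairs among the indexed pairs
theorem pvLoopA (test1 test2 : List Bool) (L : List Int) (p : Int × Int) :
    L.foldl (fun (acc : Int × Int) i =>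
      if PySem.List.pyGetD test1 i false then
        if !(PySem.List.pyGetD test2 i false) then (acc.1 + 1, acc.2) else acc
      else if !(PySem.List.pyGetD test1 i false) then
        if PySem.List.pyGetD test2 i false then (acc.1, acc.2 + 1) else acc
      else acc) p
    = (p.1 + (L.map (fun i => (PySem.List.pyGetD test1 i false, PySem.List.pyGetD test2 i false))).count (true, false),
       p.2 + (L.map (fun i => (PySem.List.pyGetD test1 i false, PySem.List.pyGetD test2 i false))).count (false, true)) := by
  induction L generalizing p with
  | nil => simp
  | cons a L ih =>
    rw [List.foldl_cons, ih]
    simp only [List.map_cons, List.count_cons]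
    cases h1 : PySem.List.pyGetD test1 a false <;>
      cases h2 : PySem.List.pyGetD test2 a false <;>
      simp [h1, h2, Prod.ext_iff] <;> omega

-- the indexed pair list A traverses IS test1.zip test2 when test2 is long enough
theorem pvKeys_eq_zip (test1 test2 : List Bool) (h : test1.length ≤ test2.length) :
    (PySem.List.pyRange 0 (test1.length : Int) 1).map
        (fun i => (PySem.List.pyGetD test1 i false, PySem.List.pyGetD test2 i false))
      = test1.zip test2 := by
  apply List.ext_getElem
  · simp [PySem.List.length_pyRange_one, h]
  · intro k hk1 hk2
    simp only [List.getElem_map, PySem.List.getElem_pyRange_one, zero_add]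
    have hk : k < test1.length := by
      simpa [PySem.List.length_pyRange_one] using hk1
    have hk2' : k < test2.length := lt_of_lt_of_le hk h
    rw [List.getElem_zip]
    have e1 : PySem.List.pyGetD test1 (k : Int) false = test1[k] := by
      rw [PySem.List.pyGetD_natCast, List.getD_eq_getElem _ _ hk]
    have e2 : PySem.List.pyGetD test2 (k : Int) false = test2[k] := by
      rw [PySem.List.pyGetD_natCast, List.getD_eq_getElem _ _ hk2']
    rw [e1, e2]

-- the generator-sum folds are countP
theorem pvFoldlCountP {A : Type} (p : A → Bool) (l : List A) :
    ∀ (c : Int), l.foldl (fun acc a => if p a then acc + 1 else acc) c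
      = c + (l.countP p : Int) := by
  induction l with
  | nil => simp
  | cons a l ih =>
    intro c
    rw [List.foldl_cons]
    by_cases h : p a = true
    · rw [if_pos h, ih, List.countP_cons, if_pos h]; push_cast; ring
    · rw [if_neg h, ih, List.countP_cons, if_neg h]; simp

theorem pvCountTrue_eq (l : List Bool) :
    pvCountTrue l = (l.countP (fun a => a) : Int) := by
  unfold pvCountTrue
  exact pvFoldlCountP (fun a => a) l 0 |>.trans (by ring)

theorem pvCountBoth_eq (l : List (Bool × Bool)) :
    pvCountBoth l = (l.countP (fun p => p.1 && p.2) : Int) := by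
  unfold pvCountBoth
  exact pvFoldlCountP (fun p => p.1 && p.2) l 0 |>.trans (by ring)

-- truncating the right list to the left's length does not change zip
theorem pvZipTake (t1 t2 : List Bool) :
    t1.zip (t2.take t1.length) = t1.zip t2 := by
  induction t1 generalizing t2 with
  | nil => simp
  | cons a t1 ih =>
    cases t2 with
    | nil => simp
    | cons b t2 => simp [List.zip_cons_cons, ih]

-- the arithmetic identities behind B, over any pair list
theorem pvIdent_fst (l : List (Bool × Bool)) :
    (l.count (true, false) : Int)
      = ((l.map Prod.fst).countP (fun a => a) : Int)
        - (l.countP (fun p => p.1 && p.2) : Int) := by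
  induction l with
  | nil => simp
  | cons a l ih =>
    rcases a with ⟨x, y⟩
    cases x <;> cases y <;>
      simp [List.count_cons, List.countP_cons, Prod.ext_iff, ih] <;> push_cast <;> omega

theorem pvIdent_snd (l : List (Bool × Bool)) :
    (l.count (false, true) : Int)
      = ((l.map Prod.snd).countP (fun a => a) : Int)
        - (l.countP (fun p => p.1 && p.2) : Int) := by
  induction l with
  | nil => simp
  | cons a l ih =>
    rcases a with ⟨x, y⟩
    cases x <;> cases y <;>
      simp [List.count_cons, List.countP_cons, Prod.ext_iff, ih] <;> push_cast <;> omega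

-- ===== VERDICT =====
theorem countMissclassified_spec : Claim_equal_countMissclassified := by
  intro test1 test2 _ hpre
  unfold Spec_countMissclassified countMissclassified countMissclassified_alt
  dsimp only
  rw [pvLoopA, pvKeys_eq_zip test1 test2 hpre]
  rw [PySem.List.slice_to_natCast]
  rw [pvZipTake, pvCountBoth_eq, pvCountTrue_eq, pvCountTrue_eq]
  have hfst : (test1.zip test2).map Prod.fst = test1 := List.map_fst_zip hpre
  have hsnd : (test1.zip test2).map Prod.snd = test2.take test1.length := by
    rw [← pvZipTake]
    exact List.map_snd_zip (by simp [hpre])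
  rw [show ((test1.zip test2).count (true, false) : Int) = _ from pvIdent_fst _,
      show ((test1.zip test2).count (false, true) : Int) = _ from pvIdent_snd _,
      hfst, hsnd]
  simp
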